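-- pv_equiv track=rewrite | github.com/danishhraza/competitive-programming | Week 2/dream2.py | is_scenario_possible
-- ===== SOURCE A (Python) =====
-- def is_scenario_possible(current_events, scenario_events):
--     for scenario_event in scenario_events:
--         if scenario_event.startswith('!'):
--             event_name = scenario_event[1:]
--             if event_name in current_events:
--                 return False
--         else:
--             if scenario_event not in current_events:
--                 return False
--     return True
-- ===== SOURCE B (Python) =====
-- def is_scenario_possible(current_events, scenario_events):
--     required = {e for e in scenario_events if not e.startswith('!')}
--     forbidden = {e[1:] for e in scenario_events if e.startswith('!')}
--     current = set(current_events)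
--     return required.issubset(current) and forbidden.isdisjoint(current)
-- ===== Notes on version B (the rewrite author's own statement) =====
-- stated objective: alternative
-- what changed: Replaces A's single early-returning branching scan with a one-pass partition of scenario_events into a required set and a forbidden (bang-stripped) set, then two bulk set predicates (issubset/isdisjoint) against set(current_events).
import Mathlib
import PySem

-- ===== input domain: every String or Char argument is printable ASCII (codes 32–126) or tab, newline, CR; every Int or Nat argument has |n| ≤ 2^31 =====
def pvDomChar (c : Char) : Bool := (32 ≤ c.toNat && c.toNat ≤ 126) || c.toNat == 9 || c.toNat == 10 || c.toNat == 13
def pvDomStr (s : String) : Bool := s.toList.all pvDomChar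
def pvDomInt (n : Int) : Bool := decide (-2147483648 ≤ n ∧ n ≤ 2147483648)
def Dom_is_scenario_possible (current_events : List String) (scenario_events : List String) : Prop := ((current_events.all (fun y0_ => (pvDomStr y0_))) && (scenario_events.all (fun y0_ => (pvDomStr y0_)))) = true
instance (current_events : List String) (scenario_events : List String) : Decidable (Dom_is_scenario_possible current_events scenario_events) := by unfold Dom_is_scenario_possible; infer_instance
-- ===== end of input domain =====

-- B replaces A's single early-returning scan with a one-pass partition into required/forbidden sets
-- plus two bulk set predicates (issubset / isdisjoint) against set(current_events); return value only.


-- ===== PORT A =====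
-- literal transliteration: loop over scenario_events with early return
def is_scenario_possible (current_events : List String) (scenario_events : List String) : Bool :=
  match scenario_events with
  | [] => true
  | scenario_event :: rest =>
    if PySem.Str.startswith scenario_event "!" then
      let event_name := PySem.Str.slice scenario_event (some 1) none
      if current_events.contains event_name then false
      else is_scenario_possible current_events rest
    else
      if ¬ current_events.contains scenario_event then false
      else is_scenario_possible current_events rest

-- ===== PORT B =====
-- partition scenario_events into required / forbidden sets, then two bulk set predicates
def is_scenario_possible_alt (current_events : List String) (scenario_events : List String) : Bool :=
  let required : PySem.Set String :=
    PySem.Set.ofList (scenario_events.filter (fun e => !(PySem.Str.startswith e "!")))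
  let forbidden : PySem.Set String :=
    PySem.Set.ofList ((scenario_events.filter (fun e => PySem.Str.startswith e "!")).map
      (fun e => PySem.Str.slice e (some 1) none))
  let current : PySem.Set String := PySem.Set.ofList current_events
  PySem.Set.issubset required current && PySem.Set.isdisjoint forbidden current

-- ===== PRECONDITION & SPEC =====
def Spec_is_scenario_possible (current_events : List String) (scenario_events : List String) (out : Bool) : Prop := out = is_scenario_possible_alt current_events scenario_events
instance (current_events : List String) (scenario_events : List String) (out : Bool) : Decidable (Spec_is_scenario_possible current_events scenario_events out) := by unfold Spec_is_scenario_possible; infer_instance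

-- ===== CLAIM (what is proved, stated in full; the proofs are below) =====
def Claim_equal_is_scenario_possible : Prop := ∀ (current_events : List String) (scenario_events : List String), Dom_is_scenario_possible current_events scenario_events → Spec_is_scenario_possible current_events scenario_events (is_scenario_possible current_events scenario_events)

-- ===== LEMMAS AND PROOFS =====
-- pointwise condition both programs decide for each scenario event
def pvOk (current_events : List String) (e : String) : Bool :=
  if PySem.Str.startswith e "!" then
    !(current_events.contains (PySem.Str.slice e (some 1) none))
  else current_events.contains e

theorem portA_eq_all (cur scen : List String) :
    is_scenario_possible cur scen = scen.all (pvOk cur) := by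
  induction scen with
  | nil => rfl
  | cons e rest ih =>
    simp only [is_scenario_possible, List.all_cons, pvOk]
    by_cases h1 : PySem.Str.startswith e "!" = true
    · simp only [if_pos h1]
      by_cases h2 : PySem.Str.slice e (some 1) none ∈ cur
      · simp [h2]
      · simp [h2, ih]
    · simp only [if_neg h1]
      by_cases h2 : e ∈ cur <;> simp [h2, ih]

theorem portB_eq_all (cur scen : List String) :
    is_scenario_possible_alt cur scen = scen.all (pvOk cur) := by
  rw [Bool.eq_iff_iff]
  simp only [is_scenario_possible_alt, Bool.and_eq_true, PySem.Set.issubset_iff,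
    PySem.Set.isdisjoint_iff, PySem.Set.mem_ofList, List.mem_filter, List.mem_map,
    List.all_eq_true, pvOk]
  constructor
  · rintro ⟨hreq, hforb⟩ e he
    by_cases hb : PySem.Str.startswith e "!" = true
    · rw [if_pos hb]
      have hnm : PySem.Str.slice e (some 1) none ∉ cur := hforb _ ⟨e, ⟨he, hb⟩, rfl⟩
      simpa [List.contains_iff_mem] using hnm
    · rw [if_neg hb]
      have hm : e ∈ cur := hreq e ⟨he, by rw [Bool.not_eq_true']; exact eq_false_of_ne_true hb⟩
      simpa [List.contains_iff_mem] using hm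
  · intro h
    constructor
    · rintro x ⟨hx, hb⟩
      have hv := h x hx
      rw [Bool.not_eq_true'] at hb
      rw [if_neg (by rw [hb]; exact Bool.false_ne_true)] at hv
      simpa [List.contains_iff_mem] using hv
    · rintro x ⟨e, ⟨he, hb⟩, rfl⟩ hm
      have hv := h e he
      rw [if_pos hb, Bool.not_eq_true'] at hv
      simp [hm] at hv

-- ===== VERDICT (by name: the statement is the Claim_ definition above) =====
theorem is_scenario_possible_spec : Claim_equal_is_scenario_possible := by
  intro cur scen _
  unfold Spec_is_scenario_possible
  rw [portA_eq_all, portB_eq_all]
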